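-- pv_equiv track=rewrite | github.com/beefoo/music-for-birds | scripts/audio_to_samples.py | replace_small_chunks
-- ===== SOURCE A (Python) =====
-- def split_chunks(x):
--     chunks = []
--     previous = None
--     for sample in x:
--         if sample != previous:
--             chunks.append([])
--         chunks[-1].append(sample)
--         previous = sample
--     return chunks
--
-- def join_chunks(chunks):
--     return [item for sublist in chunks for item in sublist]
--
-- def replace_small_chunks(chunks, search, substitute, min_length):
--     modified = []
--     for chunk in chunks:
--         cur = chunk[0]
--         if cur == search and len(chunk) < min_length:
--             cur = substitute
--         modified.append([cur for x in chunk])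
--     return split_chunks(join_chunks(modified))
-- ===== SOURCE B (Python) =====
-- # Single right-to-left pass: compute each chunk's (possibly substituted) value and
-- # length, and merge with the already-built first output chunk when values match --
-- # no flatten + re-split.
-- def replace_small_chunks(chunks, search, substitute, min_length):
--     out = []
--     for chunk in reversed(chunks):
--         v = chunk[0]
--         if v == search and len(chunk) < min_length:
--             v = substitute
--         piece = [v] * len(chunk)
--         if out and out[0][0] == v:
--             out[0] = piece + out[0]
--         else:
--             out.insert(0, piece)
--     return out
-- ===== Notes on version B (the rewrite author's own statement) =====
-- stated objective: simpler
-- what changed: B replaces A's flatten-then-regroup (build constant chunks, join to a flat list, re-split by scanning every sample with a 'previous' state) by a single pass over the chunks that computes each chunk's value and length and merges adjacent equal-valued output chunks directly, never materialising the flat list.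
import Mathlib
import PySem

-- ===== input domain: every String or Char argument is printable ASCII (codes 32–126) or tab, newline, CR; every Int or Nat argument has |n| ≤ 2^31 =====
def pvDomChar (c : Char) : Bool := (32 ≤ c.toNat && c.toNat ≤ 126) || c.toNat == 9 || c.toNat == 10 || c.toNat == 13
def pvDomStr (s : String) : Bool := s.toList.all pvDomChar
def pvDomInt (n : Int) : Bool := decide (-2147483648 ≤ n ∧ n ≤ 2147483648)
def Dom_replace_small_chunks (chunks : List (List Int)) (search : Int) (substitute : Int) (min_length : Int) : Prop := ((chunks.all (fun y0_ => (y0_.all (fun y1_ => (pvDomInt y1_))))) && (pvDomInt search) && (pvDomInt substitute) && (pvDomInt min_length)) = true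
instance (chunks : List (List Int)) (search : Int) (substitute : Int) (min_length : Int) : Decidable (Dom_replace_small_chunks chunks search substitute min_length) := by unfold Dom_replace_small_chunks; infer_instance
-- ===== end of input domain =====

-- B does one pass over the chunks, merging adjacent equal-valued output chunks directly,
-- instead of A's flatten + re-split; equivalence proved on inputs with no empty chunk
-- (on an empty chunk both Pythons raise IndexError at chunk[0]).

-- ===== PORT A =====
-- chunks[-1].append(sample): append to the last chunk (the empty-list case never occurs,
-- since the first loop iteration always appends a chunk first)
def pvAppendLast : List (List Int) → Int → List (List Int)
  | [], _ => []
  | [c], s => [c ++ [s]]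
  | c :: rest, s => c :: pvAppendLast rest s

-- one iteration of the split_chunks loop; state = (chunks so far, previous)
def pvSplitStep (st : List (List Int) × Option Int) (sample : Int) : List (List Int) × Option Int :=
  let chunks := if (some sample) ≠ st.2 then st.1 ++ [[]] else st.1
  (pvAppendLast chunks sample, some sample)

def split_chunks (x : List Int) : List (List Int) :=
  (x.foldl pvSplitStep ([], none)).1

def join_chunks (chunks : List (List Int)) : List Int :=
  chunks.flatMap id

def replace_small_chunks (chunks : List (List Int)) (search : Int) (substitute : Int) (min_length : Int) : List (List Int) :=
  let modified := chunks.map (fun chunk =>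
    match PySem.List.pyGet? chunk 0 with
    | none => []   -- Python raises IndexError at chunk[0]; excluded by Pre_
    | some h =>
      let cur := if h = search ∧ (chunk.length : Int) < min_length then substitute else h
      chunk.map (fun _ => cur))
  split_chunks (join_chunks modified)

-- ===== PORT B =====
-- the reversed-iteration loop with insert at position 0 is a foldr;
-- out[0][0] is headI (out's chunks are nonempty whenever out is reached)
def replace_small_chunks_alt (chunks : List (List Int)) (search : Int) (substitute : Int) (min_length : Int) : List (List Int) :=
  chunks.foldr (fun chunk out =>
    match PySem.List.pyGet? chunk 0 with
    | none => out   -- Python raises IndexError at chunk[0]; excluded by Pre_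
    | some h =>
      let v := if h = search ∧ (chunk.length : Int) < min_length then substitute else h
      let piece := List.replicate chunk.length v
      match out with
      | [] => [piece]
      | d :: ds => if d.headI = v then (piece ++ d) :: ds else piece :: d :: ds) []

-- ===== PRECONDITION & SPEC =====
-- Both A and B raise IndexError (chunk[0]) on any empty chunk; Pre_ excludes exactly those inputs.
def Pre_replace_small_chunks (chunks : List (List Int)) (search : Int) (substitute : Int) (min_length : Int) : Prop :=
  ∀ c ∈ chunks, c ≠ []
instance (chunks : List (List Int)) (search : Int) (substitute : Int) (min_length : Int) : Decidable (Pre_replace_small_chunks chunks search substitute min_length) := by unfold Pre_replace_small_chunks; infer_instance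

def pvWitness_replace_small_chunks : List (List Int) × Int × Int × Int := ([[1, 1], [2], [1, 1, 1]], 2, 1, 2)

def Spec_replace_small_chunks (chunks : List (List Int)) (search : Int) (substitute : Int) (min_length : Int) (out : List (List Int)) : Prop := out = replace_small_chunks_alt chunks search substitute min_length
instance (chunks : List (List Int)) (search : Int) (substitute : Int) (min_length : Int) (out : List (List Int)) : Decidable (Spec_replace_small_chunks chunks search substitute min_length out) := by unfold Spec_replace_small_chunks; infer_instance

-- ===== CLAIM (what is proved, stated in full; the proofs are below) =====
def Claim_equal_replace_small_chunks : Prop := ∀ (chunks : List (List Int)) (search : Int) (substitute : Int) (min_length : Int), Dom_replace_small_chunks chunks search substitute min_length → Pre_replace_small_chunks chunks search substitute min_length → Spec_replace_small_chunks chunks search substitute min_length (replace_small_chunks chunks search substitute min_length)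

-- ===== LEMMAS AND PROOFS =====

-- clean recursive reading of split_chunks' loop: p = value of the chunk being built, c = that chunk
def pvG (p : Int) (c : List Int) : List Int → List (List Int)
  | [] => [c]
  | x :: xs => if x = p then pvG p (c ++ [x]) xs else c :: pvG x [x] xs

theorem pvAppendLast_eq (acc : List (List Int)) (c : List Int) (s : Int) :
    pvAppendLast (acc ++ [c]) s = acc ++ [c ++ [s]] := by
  induction acc with
  | nil => simp [pvAppendLast]
  | cons a t ih =>
    cases t with
    | nil => simp [pvAppendLast]
    | cons b t' => simpa [pvAppendLast] using ih

theorem pvAppendLast_pair (acc : List (List Int)) (c d : List Int) (s : Int) :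
    pvAppendLast (acc ++ [c, d]) s = acc ++ [c, d ++ [s]] := by
  induction acc with
  | nil => simp [pvAppendLast]
  | cons a t ih => cases t with
    | nil => simp [pvAppendLast]
    | cons b t' => simpa [pvAppendLast] using ih

theorem pvFoldl_splitStep (xs : List Int) : ∀ (acc : List (List Int)) (c : List Int) (p : Int),
    ((xs.foldl pvSplitStep (acc ++ [c], some p))).1 = acc ++ pvG p c xs := by
  induction xs with
  | nil => intro acc c p; simp [pvG]
  | cons x xs ih =>
    intro acc c p
    by_cases h : x = p
    · subst h
      have hstep : pvSplitStep (acc ++ [c], some x) x = (acc ++ [c ++ [x]], some x) := by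
        simp [pvSplitStep, pvAppendLast_eq]
      simp [List.foldl_cons, hstep, ih, pvG]
    · have hstep : pvSplitStep (acc ++ [c], some p) x = ((acc ++ [c]) ++ [[x]], some x) := by
        simp [pvSplitStep, h, pvAppendLast_pair]
      rw [List.foldl_cons, hstep, ih (acc ++ [c]) [x] x]
      simp [pvG, h]

theorem pv_split_cons (x : Int) (xs : List Int) : split_chunks (x :: xs) = pvG x [x] xs := by
  have hstep : pvSplitStep (([] : List (List Int)), (none : Option Int)) x = ([[x]], some x) := by
    simp [pvSplitStep, pvAppendLast]
  have := pvFoldl_splitStep xs [] [x] x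
  simpa [split_chunks, hstep] using this

theorem pvG_replicate (k : ℕ) (v : Int) (c : List Int) (ys : List Int) :
    pvG v c (List.replicate k v ++ ys) = pvG v (c ++ List.replicate k v) ys := by
  induction k generalizing c with
  | zero => simp
  | succ k ih =>
    simp [List.replicate_succ, pvG, ih, List.append_assoc]

-- A's per-chunk transformation, named for the proofs (definitionally the lambda in the port)
def pvPiece (search substitute min_length : Int) (chunk : List Int) : List Int :=
  match PySem.List.pyGet? chunk 0 with
  | none => []
  | some h =>
    let cur := if h = search ∧ (chunk.length : Int) < min_length then substitute else h
    chunk.map (fun _ => cur)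

theorem pvPiece_cons (s u m h : Int) (t : List Int) :
    pvPiece s u m (h :: t) =
      List.replicate (t.length + 1) (if h = s ∧ ((t.length : Int) + 1) < m then u else h) := by
  simp [pvPiece, PySem.List.pyGet?, PySem.List.pyIdx?, List.map_const', List.replicate_succ]

theorem pvAlt_cons (s u m h : Int) (t : List Int) (rest : List (List Int)) :
    replace_small_chunks_alt ((h :: t) :: rest) s u m =
      (match replace_small_chunks_alt rest s u m with
        | [] => [List.replicate (t.length + 1) (if h = s ∧ ((t.length : Int) + 1) < m then u else h)]
        | d :: ds =>
          if d.headI = (if h = s ∧ ((t.length : Int) + 1) < m then u else h) then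
            (List.replicate (t.length + 1) (if h = s ∧ ((t.length : Int) + 1) < m then u else h) ++ d) :: ds
          else
            List.replicate (t.length + 1) (if h = s ∧ ((t.length : Int) + 1) < m then u else h) :: d :: ds) := by
  simp [replace_small_chunks_alt, PySem.List.pyGet?, PySem.List.pyIdx?, List.replicate_succ]

-- main invariant: pvG over the flattened modified pieces equals B's fold, merged with (v, c)
theorem pvG_flat (s u m : Int) (chunks : List (List Int)) (hne : ∀ ch ∈ chunks, ch ≠ []) :
    ∀ (v : Int) (c : List Int),
      pvG v c (join_chunks (chunks.map (pvPiece s u m))) =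
      (match replace_small_chunks_alt chunks s u m with
        | [] => [c]
        | d :: ds => if d.headI = v then (c ++ d) :: ds else c :: d :: ds) := by
  induction chunks with
  | nil => intro v c; simp [join_chunks, replace_small_chunks_alt, pvG]
  | cons ch rest ih =>
    intro v c
    obtain ⟨h, t, rfl⟩ : ∃ h t, ch = h :: t := by
      cases ch with
      | nil => exact absurd rfl (hne [] (by simp))
      | cons h t => exact ⟨h, t, rfl⟩
    have hrest : ∀ c ∈ rest, c ≠ [] := fun c hc => hne c (List.mem_cons_of_mem _ hc)
    set vv := (if h = s ∧ ((t.length : Int) + 1) < m then u else h) with hvv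
    set J := join_chunks (rest.map (pvPiece s u m)) with hJ
    have hjoin : join_chunks (((h :: t) :: rest).map (pvPiece s u m)) =
        List.replicate (t.length + 1) vv ++ J := by
      simp [join_chunks, pvPiece_cons, hJ, hvv]
    rw [hjoin, pvAlt_cons, ← hvv]
    by_cases hv : vv = v
    · rw [hv, pvG_replicate, ih hrest]
      rcases hA : replace_small_chunks_alt rest s u m with _ | ⟨d, ds⟩
      · simp [List.replicate_succ]
      · by_cases hd : d.headI = v
        · simp [hd, List.replicate_succ, List.append_assoc]
        · simp [hd, List.replicate_succ]
    · have hG : pvG v c (List.replicate (t.length + 1) vv ++ J) =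
          c :: pvG vv (List.replicate (t.length + 1) vv) J := by
        rw [List.replicate_succ, List.cons_append]
        simp [pvG, hv, pvG_replicate]
      rw [hG, ih hrest]
      rcases hA : replace_small_chunks_alt rest s u m with _ | ⟨d, ds⟩
      · simp [List.replicate_succ, hv]
      · by_cases hd : d.headI = vv
        · simp [hd, hv, List.replicate_succ]
        · simp [hd, hv, List.replicate_succ]

theorem replace_small_chunks_spec : Claim_equal_replace_small_chunks := by
  intro chunks s u m _hdom hpre
  unfold Spec_replace_small_chunks
  cases chunks with
  | nil => rfl
  | cons ch rest =>
    obtain ⟨h, t, rfl⟩ : ∃ h t, ch = h :: t := by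
      cases ch with
      | nil => exact absurd rfl (hpre [] (by simp))
      | cons h t => exact ⟨h, t, rfl⟩
    have hrest : ∀ c ∈ rest, c ≠ [] := fun c hc => hpre c (List.mem_cons_of_mem _ hc)
    have hA : replace_small_chunks ((h :: t) :: rest) s u m =
        split_chunks (join_chunks (((h :: t) :: rest).map (pvPiece s u m))) := rfl
    rw [hA]
    set vv := (if h = s ∧ ((t.length : Int) + 1) < m then u else h) with hvv
    have hjoin : join_chunks (((h :: t) :: rest).map (pvPiece s u m)) =
        vv :: (List.replicate t.length vv ++ join_chunks (rest.map (pvPiece s u m))) := by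
      simp [join_chunks, pvPiece_cons, List.replicate_succ, hvv]
    rw [hjoin, pv_split_cons, pvG_replicate,
      pvG_flat s u m rest hrest vv ([vv] ++ List.replicate t.length vv), pvAlt_cons, ← hvv]
    rcases hAr : replace_small_chunks_alt rest s u m with _ | ⟨d, ds⟩
    · simp [List.replicate_succ]
    · by_cases hd : d.headI = vv
      · simp [hd, List.replicate_succ]
      · simp [hd, List.replicate_succ]
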